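-- pv_equiv track=rewrite | github.com/involutefish/pitch_class_Set_calculator_expansion | find_tetrachords_GUI.py | compacted_sets
-- ===== SOURCE A (Python) =====
-- def generate_rotations(pcs):
--     """生成集合的所有轮转排列"""
--     pcs={int(x) for x in pcs.split(",") if x.strip().isdigit()}
--     pcs_sorted = sorted(pcs)  # 先对集合进行升序排序
--     return [pcs_sorted[i:] + pcs_sorted[:i] for i in range(len(pcs_sorted))]
--
-- def compacted_sets(pcs):
--     rotations = generate_rotations(pcs)  # 生成所有轮转排列
--     interval_set = []  # 存储所有轮转排列的宽度
--     # 计算每个轮转排列的宽度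
--     for ps in rotations:
--         interval = (ps[-1] - ps[0]) % 12
--         interval_set.append(interval)
--     # 找到最小值及其索引
--     min_value = min(interval_set)  # 获取最小宽度
--     min_indices = [index for index, value in enumerate(interval_set) if value == min_value]  # 获取最小值的索引
--     #输出最窄集合
--     compacted_sets=[]
--     for i in min_indices:
--         compacted_sets.append(rotations[i])
--     return compacted_sets
-- ===== SOURCE B (Python) =====
-- def compacted_sets(pcs):
--     s = sorted({int(x) for x in pcs.split(",") if x.strip().isdigit()})
--     best = (s[-1] - s[0]) % 12
--     winners = [s]
--     for i in range(1, len(s)):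
--         w = (s[i - 1] - s[i]) % 12
--         if w < best:
--             best, winners = w, [s[i:] + s[:i]]
--         elif w == best:
--             winners.append(s[i:] + s[:i])
--     return winners
-- ===== Notes on version B (the rewrite author's own statement) =====
-- stated objective: faster
-- what changed: B makes a single pass over the sorted values with a running-minimum accumulator (reset on a strict improvement, append on a tie), scoring each rotation directly as the circular gap (s[i-1]-s[i]) % 12 and materialising only the winning rotations, instead of A's staged passes that build every rotation, span each, take min over the width list, collect the min indices and re-index the rotation list.
import Mathlib
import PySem

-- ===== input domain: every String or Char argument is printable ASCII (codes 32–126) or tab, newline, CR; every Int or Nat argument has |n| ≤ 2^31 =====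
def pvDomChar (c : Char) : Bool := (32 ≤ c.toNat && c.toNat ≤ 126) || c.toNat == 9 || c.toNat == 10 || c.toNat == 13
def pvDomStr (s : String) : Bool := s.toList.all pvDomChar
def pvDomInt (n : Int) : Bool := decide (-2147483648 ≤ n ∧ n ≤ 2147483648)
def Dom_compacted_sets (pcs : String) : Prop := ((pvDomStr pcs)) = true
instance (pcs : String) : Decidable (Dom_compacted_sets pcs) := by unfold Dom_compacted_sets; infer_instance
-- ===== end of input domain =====

-- B replaces A's staged passes (build all rotations, span each, min over the width list,
-- collect min indices, re-index) by ONE pass with a running-minimum accumulator, scoring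
-- rotation i directly as the circular gap (s[i-1]-s[i]) % 12 and building only the winners.

-- shared parse, identical character-for-character in both Pythons:
-- sorted({int(x) for x in pcs.split(",") if x.strip().isdigit()})
-- (split? is never none since the separator "," is nonempty; int(x) always succeeds when x.strip().isdigit() on the ASCII domain; the getD 0 default is never used)
def pvSortedSet (pcs : String) : List Int :=
  PySem.List.sorted
    (PySem.Set.ofList
      ((((PySem.Str.split? pcs ",").getD []).filter (fun x => PySem.Str.strIsdigit (PySem.Str.strip x))).map
        (fun x => (PySem.Int.ofStr? x).getD 0)))
    (fun v => v) false

-- ===== PORT A =====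
def generate_rotations (pcs : String) : List (List Int) :=
  let pcs_sorted := pvSortedSet pcs
  (PySem.List.pyRange 0 (pcs_sorted.length : Int) 1).map
    (fun i => PySem.List.slice pcs_sorted (some i) none ++ PySem.List.slice pcs_sorted none (some i))

def compacted_sets (pcs : String) : List (List Int) :=
  let rotations := generate_rotations pcs
  -- for ps in rotations: interval_set.append((ps[-1] - ps[0]) % 12)   (ps is never empty when reached)
  let interval_set := rotations.foldl
    (fun acc ps => acc ++ [PySem.Int.mod (PySem.List.pyGetD ps (-1) 0 - PySem.List.pyGetD ps 0 0) 12]) []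
  match PySem.List.min? interval_set (fun v => v) with
  | none => []   -- min([]) raises ValueError: excluded by Pre_
  | some min_value =>
    let min_indices := ((PySem.List.enumerate interval_set 0).filter (fun p => p.2 == min_value)).map (·.1)
    min_indices.foldl (fun acc i => acc ++ [PySem.List.pyGetD rotations i []]) []

-- ===== PORT B =====
-- single pass, state (best, winners) seeded with rotation 0 (= s itself); reset on strict
-- improvement, append on tie.  s[-1]/s[0] raise IndexError on an empty s: excluded by Pre_
-- (the pyGetD default 0 is never reached inside Pre_).
def compacted_sets_alt (pcs : String) : List (List Int) :=
  let s := pvSortedSet pcs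
  ((PySem.List.pyRange 1 (s.length : Int) 1).foldl
    (fun (st : Int × List (List Int)) i =>
      let w := PySem.Int.mod (PySem.List.pyGetD s (i - 1) 0 - PySem.List.pyGetD s i 0) 12
      if w < st.1 then (w, [PySem.List.slice s (some i) none ++ PySem.List.slice s none (some i)])
      else if w == st.1 then (st.1, st.2 ++ [PySem.List.slice s (some i) none ++ PySem.List.slice s none (some i)])
      else st)
    (PySem.Int.mod (PySem.List.pyGetD s (-1) 0 - PySem.List.pyGetD s 0 0) 12, [s])).2

-- ===== PRECONDITION & SPEC =====
-- Pre_ excludes exactly the inputs whose comma fields contain no digit-string: there A's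
-- min() of the empty width list raises ValueError.
def Pre_compacted_sets (pcs : String) : Prop :=
  (((PySem.Str.split? pcs ",").getD []).any (fun x => PySem.Str.strIsdigit (PySem.Str.strip x))) = true
instance (pcs : String) : Decidable (Pre_compacted_sets pcs) := by unfold Pre_compacted_sets; infer_instance
def pvWitness_compacted_sets : String := "0, 4 ,7,11"

def Spec_compacted_sets (pcs : String) (out : List (List Int)) : Prop := out = compacted_sets_alt pcs
instance (pcs : String) (out : List (List Int)) : Decidable (Spec_compacted_sets pcs out) := by
  unfold Spec_compacted_sets; infer_instance

-- ===== CLAIM (what is proved, stated in full; the proofs are below) =====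
def Claim_equal_compacted_sets : Prop :=
  ∀ (pcs : String), Dom_compacted_sets pcs → Pre_compacted_sets pcs →
    Spec_compacted_sets pcs (compacted_sets pcs)

-- ===== LEMMAS AND PROOFS =====

-- proof-side abbreviations: the width of rotation i read off the sorted list, the rotation itself,
-- and B's loop body over abstract width/rotation functions
def pvF (s : List Int) (i : Int) : Int :=
  PySem.Int.mod (PySem.List.pyGetD s (i - 1) 0 - PySem.List.pyGetD s i 0) 12

def pvRot (s : List Int) (i : Int) : List Int :=
  PySem.List.slice s (some i) none ++ PySem.List.slice s none (some i)

def pvStep (f : Int → Int) (g : Int → List Int)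
    (st : Option Int × List (List Int)) (i : Int) : Option Int × List (List Int) :=
  let w := f i
  match st.1 with
  | none => (some w, [g i])
  | some b => if w < b then (some w, [g i]) else if w == b then (some b, st.2 ++ [g i]) else st

def pvStep2 (f : Int → Int) (g : Int → List Int)
    (st : Int × List (List Int)) (i : Int) : Int × List (List Int) :=
  let w := f i
  if w < st.1 then (w, [g i]) else if w == st.1 then (st.1, st.2 ++ [g i]) else st

-- B's seeded Int-state fold is the Option-state fold started after step 0
theorem pv_step2_fold (f : Int → Int) (g : Int → List Int) (l : List Int)
    (b0 : Int) (acc0 : List (List Int)) :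
    List.foldl (pvStep f g) (some b0, acc0) l
      = (some (List.foldl (pvStep2 f g) (b0, acc0) l).1,
         (List.foldl (pvStep2 f g) (b0, acc0) l).2) := by
  induction l generalizing b0 acc0 with
  | nil => rfl
  | cons a l ih =>
    simp only [List.foldl_cons]
    have hstep : pvStep f g (some b0, acc0) a
        = (some (pvStep2 f g (b0, acc0) a).1, (pvStep2 f g (b0, acc0) a).2) := by
      simp only [pvStep, pvStep2]
      split_ifs <;> rfl
    rw [hstep]
    exact ih _ _

theorem pv_head (s : List Int) (k : Nat) (hk : k < s.length) :
    PySem.List.pyGetD (s.drop k ++ s.take k) 0 0 = PySem.List.pyGetD s (k : Int) 0 := by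
  rw [PySem.List.pyGetD_zero, PySem.List.pyGetD_natCast]
  rw [List.getD_eq_getElem?_getD, List.getD_eq_getElem?_getD]
  rw [List.getElem?_append_left (by simp; omega), List.getElem?_drop]
  simp

theorem pv_last (s : List Int) (k : Nat) (hk : k < s.length) :
    PySem.List.pyGetD (s.drop k ++ s.take k) (-1) 0 = PySem.List.pyGetD s ((k : Int) - 1) 0 := by
  have hne : s ≠ [] := by intro h; simp [h] at hk
  rcases Nat.eq_zero_or_pos k with h0 | hpos
  · subst h0
    simp [PySem.List.pyGetD_neg_one _ _ hne]
  · have htk : s.take k ≠ [] := by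
      intro h
      rcases List.take_eq_nil_iff.mp h with h' | h'
      · omega
      · exact hne h'
    have hrot : s.drop k ++ s.take k ≠ [] := by simp [hne]; omega
    rw [PySem.List.pyGetD_neg_one _ _ hrot]
    have h1 : ((k : Int) - 1) = ((k - 1 : Nat) : Int) := by omega
    rw [h1, PySem.List.pyGetD_natCast]
    rw [List.getLast_append_right htk, List.getLast_eq_getElem,
        List.getD_eq_getElem?_getD, List.getElem?_eq_getElem (by omega)]
    simp only [Option.getD_some]
    rw [List.getElem_take]
    congr 1
    simp
    omega

-- the width A computes from rotation i equals the gap formula B evaluates at i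
theorem pv_width (s : List Int) (i : Int) (h0 : 0 ≤ i) (h1 : i < (s.length : Int)) :
    PySem.Int.mod (PySem.List.pyGetD (pvRot s i) (-1) 0 - PySem.List.pyGetD (pvRot s i) 0 0) 12
      = pvF s i := by
  have hk : i.toNat < s.length := by omega
  have hcast : ((i.toNat : Int)) = i := by omega
  have hh := pv_head s i.toNat hk
  have hl := pv_last s i.toNat hk
  rw [hcast] at hh hl
  unfold pvRot pvF
  rw [PySem.List.slice_from s h0, PySem.List.slice_to s h0, hh, hl]

theorem pv_min_snoc (xs : List Int) (a : Int) :
    PySem.List.min? (xs ++ [a]) (fun v => v)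
      = some (match PySem.List.min? xs (fun v => v) with | none => a | some m => min m a) := by
  cases xs with
  | nil => simp [PySem.List.min?]
  | cons x t =>
    rw [List.cons_append, PySem.List.min?_id_cons, PySem.List.min?_id_cons,
        List.foldl_append]
    simp

-- B's fold computes A's staged result: running minimum + tie-collected winners
theorem pv_fold_char (f : Int → Int) (g : Int → List Int) (l : List Int) :
    List.foldl (pvStep f g) (none, []) l
      = (PySem.List.min? (l.map f) (fun v => v),
         match PySem.List.min? (l.map f) (fun v => v) with
         | none => []
         | some m => (l.filter (fun i => f i == m)).map g) := by
  induction l using List.reverseRecOn with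
  | nil => simp [PySem.List.min?]
  | append_singleton l a ih =>
    rw [List.foldl_append, ih]
    simp only [List.map_append, List.map_cons, List.map_nil]
    rw [pv_min_snoc]
    cases hm : PySem.List.min? (l.map f) (fun v => v) with
    | none =>
      have hl : l = [] := by
        have := PySem.List.min?_eq_none_iff (xs := l.map f) (key := fun v => v)
        simp [hm] at this; exact this
      subst hl
      simp [pvStep]
    | some m =>
      have hmin := PySem.List.min?_isMin hm
      simp only [List.foldl_cons, List.foldl_nil, pvStep]
      by_cases hlt : f a < m
      · have hnone : l.filter (fun i => f i == f a) = [] := by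
          apply List.filter_eq_nil_iff.mpr
          intro x hx
          have : m ≤ f x := hmin (f x) (List.mem_map_of_mem hx)
          simp; omega
        have hmm : min m (f a) = f a := by omega
        simp [hlt, hmm, List.filter_append, hnone]
      · by_cases heq : f a = m
        · have hmm : min m (f a) = m := by omega
          simp [heq, List.filter_append]
        · have hgt : m < f a := by omega
          have hne : (f a == m) = false := by simp; omega
          have hmm : min m (f a) = m := by omega
          have h2 : ¬ f a ≤ m := by omega
          simp [hlt, List.filter_append, hne, hmm]

theorem pv_sorted_ne_nil (pcs : String) (h : Pre_compacted_sets pcs) :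
    pvSortedSet pcs ≠ [] := by
  unfold Pre_compacted_sets at h
  rw [List.any_eq_true] at h
  obtain ⟨x, hx, hdig⟩ := h
  intro hnil
  unfold pvSortedSet at hnil
  rw [PySem.List.sorted_eq_nil_iff] at hnil
  have hmem : ((PySem.Int.ofStr? x).getD 0) ∈
      PySem.Set.ofList
        ((((PySem.Str.split? pcs ",").getD []).filter (fun x => PySem.Str.strIsdigit (PySem.Str.strip x))).map
          (fun x => (PySem.Int.ofStr? x).getD 0)) := by
    rw [PySem.Set.mem_ofList]
    exact List.mem_map_of_mem (List.mem_filter.mpr ⟨hx, hdig⟩)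
  rw [hnil] at hmem
  exact (List.not_mem_nil) hmem

theorem compacted_sets_main (pcs : String) (hne : pvSortedSet pcs ≠ []) :
    compacted_sets pcs = compacted_sets_alt pcs := by
  simp only [compacted_sets, compacted_sets_alt, generate_rotations]
  set s := pvSortedSet pcs with hs
  have hlen0 : 0 < (s.length : Int) := by
    have := List.length_pos_iff.mpr hne
    omega
  -- B's side: the seeded Int-state fold is the Option-state fold over the full index range
  have hB : (fun (st : Int × List (List Int)) (i : Int) =>
      let w := PySem.Int.mod (PySem.List.pyGetD s (i - 1) 0 - PySem.List.pyGetD s i 0) 12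
      if w < st.1 then (w, [PySem.List.slice s (some i) none ++ PySem.List.slice s none (some i)])
      else if w == st.1 then (st.1, st.2 ++ [PySem.List.slice s (some i) none ++ PySem.List.slice s none (some i)])
      else st) = pvStep2 (pvF s) (pvRot s) := rfl
  have hrot0 : pvRot s 0 = s := by
    unfold pvRot
    rw [PySem.List.slice_from s (by omega), PySem.List.slice_to s (by omega)]
    simp
  have hseed : (PySem.Int.mod (PySem.List.pyGetD s (-1) 0 - PySem.List.pyGetD s 0 0) 12, ([s] : List (List Int)))
      = (pvF s 0, [pvRot s 0]) := by rw [hrot0]; rfl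
  rw [hB, hseed]
  have h2 := pv_step2_fold (pvF s) (pvRot s) (PySem.List.pyRange 1 (s.length : Int) 1) (pvF s 0) [pvRot s 0]
  have hsnd : (List.foldl (pvStep2 (pvF s) (pvRot s)) (pvF s 0, [pvRot s 0]) (PySem.List.pyRange 1 (s.length : Int) 1)).2
      = (List.foldl (pvStep (pvF s) (pvRot s)) ((none : Option Int), ([] : List (List Int))) (PySem.List.pyRange 0 (s.length : Int) 1)).2 := by
    rw [PySem.List.pyRange_one_cons hlen0, List.foldl_cons]
    have hfirst : pvStep (pvF s) (pvRot s) (none, []) (0 : Int) = (some (pvF s 0), [pvRot s 0]) := rfl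
    rw [hfirst]
    simp only [zero_add]
    rw [h2]
  rw [hsnd, pv_fold_char]
  -- A's width list is the map of pvF over the index range
  have hIS : List.foldl
      (fun acc ps =>
        acc ++ [PySem.Int.mod (PySem.List.pyGetD ps (-1) 0 - PySem.List.pyGetD ps 0 0) 12]) []
      (List.map (fun i => PySem.List.slice s (some i) none ++ PySem.List.slice s none (some i))
        (PySem.List.pyRange 0 (s.length : Int) 1))
      = List.map (fun i => pvF s i) (PySem.List.pyRange 0 (s.length : Int) 1) := by
    rw [PySem.List.foldl_append_singleton_eq_map, List.nil_append, List.map_map]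
    apply List.map_congr_left
    intro i hi
    rw [PySem.List.mem_pyRange_one] at hi
    exact pv_width s i hi.1 hi.2
  rw [hIS]
  cases hmin : PySem.List.min?
      (List.map (fun i => pvF s i) (PySem.List.pyRange 0 (s.length : Int) 1)) (fun v => v) with
  | none => rfl
  | some m =>
    have hlen : ((List.map (fun i => pvF s i)
        (PySem.List.pyRange 0 (s.length : Int) 1)).length : Int) = (s.length : Int) := by
      simp [PySem.List.length_pyRange_one]
    have hidx : ((PySem.List.enumerate
          (List.map (fun i => pvF s i) (PySem.List.pyRange 0 (s.length : Int) 1)) 0).filter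
            (fun p => p.2 == m)).map (fun p => p.1)
        = (PySem.List.pyRange 0 (s.length : Int) 1).filter (fun j => pvF s j == m) := by
      rw [PySem.List.enumerate_eq_map_pyRange _ 0, PySem.List.len_eq, hlen]
      rw [List.filter_map, List.map_map]
      have hfc : List.filter
            ((fun p => p.2 == m) ∘ fun j =>
              (j, PySem.List.pyGetD
                (List.map (fun i => pvF s i) (PySem.List.pyRange 0 (s.length : Int) 1)) j 0))
            (PySem.List.pyRange 0 (s.length : Int) 1)
          = List.filter (fun j => pvF s j == m) (PySem.List.pyRange 0 (s.length : Int) 1) := by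
        apply List.filter_congr
        intro j hj
        rw [PySem.List.mem_pyRange_one] at hj
        simp only [Function.comp_apply]
        rw [PySem.List.pyGetD_map_pyRange_of_nonneg _ _ j 0 hj.1 hj.2]
      rw [hfc]
      simp [Function.comp_def]
    dsimp only
    rw [hidx, PySem.List.foldl_append_singleton_eq_map, List.nil_append]
    apply List.map_congr_left
    intro j hj
    have hj' := List.mem_of_mem_filter hj
    rw [PySem.List.mem_pyRange_one] at hj'
    rw [PySem.List.pyGetD_map_pyRange_of_nonneg _ _ j [] hj'.1 hj'.2]
    rfl

-- ===== VERDICT (by name: the statement is the Claim_ definition above) =====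
theorem compacted_sets_spec : Claim_equal_compacted_sets := by
  intro pcs _ hpre
  unfold Spec_compacted_sets
  exact compacted_sets_main pcs (pv_sorted_ne_nil pcs hpre)
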